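-- pv_equiv track=rewrite | github.com/christyowidiasmoro/codility | challenges/technetium.py | solution
-- ===== SOURCE A (Python) =====
-- def solution(A):
--     m = len(A)
--     n = len(A[0])
--
--     S = [[0] * n for _ in range(m) ]
--
--     S[0][0] = A[0][0]
--
--     for i in range(1, m):
--         S[i][0] = S[i-1][0] * 10 + A[i][0]
--
--     for i in range(1, n):
--         S[0][i] = S[0][i-1] * 10 + A[0][i]
--
--
--     for i in range(1, m):
--         for j in range(1, n):
--             S[i][j] = max(S[i-1][j], S[i][j-1]) * 10 + A[i][j]
--
--     return str(S[m-1][n-1])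
-- ===== SOURCE B (Python) =====
-- def solution(A):
--     # top-down memoized recursion over cells instead of A's three bottom-up table-filling loops
--     memo = {}
--
--     def best(i, j):
--         if (i, j) in memo:
--             return memo[(i, j)]
--         if i == 0 and j == 0:
--             v = A[0][0]
--         elif i == 0:
--             v = best(0, j - 1) * 10 + A[0][j]
--         elif j == 0:
--             v = best(i - 1, 0) * 10 + A[i][0]
--         else:
--             v = max(best(i - 1, j), best(i, j - 1)) * 10 + A[i][j]
--         memo[(i, j)] = v
--         return v
--
--     return str(best(len(A) - 1, len(A[0]) - 1))
-- ===== Notes on version B (the rewrite author's own statement) =====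
-- stated objective: alternative
-- what changed: B replaces A's three bottom-up table-filling loop phases (first column, first row, interior, row-major) with a top-down memoized recursion best(i,j) over cells that takes each in-bounds predecessor explicitly, memoized in a dict keyed by (i,j); same recurrence evaluated in demand order instead of row-major.
import Mathlib
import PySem

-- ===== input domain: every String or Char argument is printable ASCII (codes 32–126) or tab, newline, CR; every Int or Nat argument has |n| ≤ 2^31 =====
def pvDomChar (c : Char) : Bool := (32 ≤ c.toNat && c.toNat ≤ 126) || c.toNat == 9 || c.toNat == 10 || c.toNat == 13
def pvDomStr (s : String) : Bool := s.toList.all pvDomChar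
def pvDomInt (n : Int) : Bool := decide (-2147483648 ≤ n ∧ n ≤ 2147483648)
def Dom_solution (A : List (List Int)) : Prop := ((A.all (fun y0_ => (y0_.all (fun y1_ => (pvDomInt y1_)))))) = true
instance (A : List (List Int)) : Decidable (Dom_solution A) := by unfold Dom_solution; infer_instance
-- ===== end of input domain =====

-- B replaces A's three bottom-up table-filling loops by a top-down memoized recursion over cells; same values, proved equal under Pre_.

-- ===== PORT A =====
-- A indexes S[i][j] / A[i][j]; in-range under Pre_, so getD defaults are never hit there.
def pvGet2 (S : List (List Int)) (i j : Nat) : Int := (S.getD i []).getD j 0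
def pvSet2 (S : List (List Int)) (i j : Nat) (v : Int) : List (List Int) :=
  S.set i ((S.getD i []).set j v)
-- the three loop bodies of A, named
def pvColStep (A : List (List Int)) (S : List (List Int)) (i : Nat) : List (List Int) :=
  pvSet2 S i 0 (pvGet2 S (i-1) 0 * 10 + pvGet2 A i 0)
def pvRowStep (A : List (List Int)) (S : List (List Int)) (j : Nat) : List (List Int) :=
  pvSet2 S 0 j (pvGet2 S 0 (j-1) * 10 + pvGet2 A 0 j)
def pvCellStep (A : List (List Int)) (i : Nat) (S : List (List Int)) (j : Nat) : List (List Int) :=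
  pvSet2 S i j (max (pvGet2 S (i-1) j) (pvGet2 S i (j-1)) * 10 + pvGet2 A i j)
def pvInnerLoop (A : List (List Int)) (n : Nat) (S : List (List Int)) (i : Nat) : List (List Int) :=
  (List.range' 1 (n-1)).foldl (pvCellStep A i) S

def solution (A : List (List Int)) : String :=
  let m := A.length
  let n := (A.headD []).length
  let S0 := List.replicate m (List.replicate n 0)
  let S1 := pvSet2 S0 0 0 (pvGet2 A 0 0)
  let S2 := (List.range' 1 (m-1)).foldl (pvColStep A) S1
  let S3 := (List.range' 1 (n-1)).foldl (pvRowStep A) S2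
  let S4 := (List.range' 1 (m-1)).foldl (pvInnerLoop A n) S3
  PySem.Int.toStr (pvGet2 S4 (m-1) (n-1))

-- ===== PORT B =====
-- Source B's best(i, j): memo hit first, then the four branches in Source B's order
-- (the guard chain 'i==0 and j==0 / i==0 / j==0 / else' is the four-way match);
-- the memo dict is threaded through the recursive calls in call order.
def pvBest (A : List (List Int)) (i j : Nat) (memo : PySem.Dict (Nat × Nat) Int) :
    Int × PySem.Dict (Nat × Nat) Int :=
  match memo.get? (i, j) with
  | some v => (v, memo)
  | none =>
    match i, j with
    | 0, 0 =>
      let v := pvGet2 A 0 0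
      (v, memo.insert (0, 0) v)
    | 0, j'+1 =>
      let r := pvBest A 0 j' memo
      let v := r.1 * 10 + pvGet2 A 0 (j'+1)
      (v, r.2.insert (0, j'+1) v)
    | i'+1, 0 =>
      let r := pvBest A i' 0 memo
      let v := r.1 * 10 + pvGet2 A (i'+1) 0
      (v, r.2.insert (i'+1, 0) v)
    | i'+1, j'+1 =>
      let r1 := pvBest A i' (j'+1) memo
      let r2 := pvBest A (i'+1) j' r1.2
      let v := max r1.1 r2.1 * 10 + pvGet2 A (i'+1) (j'+1)
      (v, r2.2.insert (i'+1, j'+1) v)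
termination_by (i, j)

def solution_alt (A : List (List Int)) : String :=
  PySem.Int.toStr (pvBest A (A.length - 1) ((A.headD []).length - 1) PySem.Dict.empty).1

-- ===== PRECONDITION & SPEC =====
-- Pre_ excludes exactly the inputs where Python A raises IndexError: the empty grid,
-- an empty first row, or a later row shorter than the first row.
def Pre_solution (A : List (List Int)) : Prop :=
  A ≠ [] ∧ A.headD [] ≠ [] ∧ ∀ r ∈ A, (A.headD []).length ≤ r.length
instance (A : List (List Int)) : Decidable (Pre_solution A) := by unfold Pre_solution; infer_instance
def pvWitness_solution : List (List Int) := [[1, 2], [3, 4]]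

def Spec_solution (A : List (List Int)) (out : String) : Prop := out = solution_alt A
instance (A : List (List Int)) (out : String) : Decidable (Spec_solution A out) := by unfold Spec_solution; infer_instance

-- ===== CLAIM (what is proved, stated in full; the proofs are below) =====
def Claim_equal_solution : Prop := ∀ (A : List (List Int)), Dom_solution A → Pre_solution A → Spec_solution A (solution A)

-- ===== LEMMAS AND PROOFS =====

-- the common recurrence both programs compute
def pvF (A : List (List Int)) : Nat → Nat → Int
  | 0, 0 => pvGet2 A 0 0
  | i+1, 0 => pvF A i 0 * 10 + pvGet2 A (i+1) 0
  | 0, j+1 => pvF A 0 j * 10 + pvGet2 A 0 (j+1)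
  | i+1, j+1 => max (pvF A i (j+1)) (pvF A (i+1) j) * 10 + pvGet2 A (i+1) (j+1)

def pvShp (m n : Nat) (S : List (List Int)) : Prop :=
  S.length = m ∧ ∀ r ∈ S, r.length = n

theorem pvShp_set2 {m n : Nat} {S : List (List Int)} (hS : pvShp m n S)
    (i j : Nat) (v : Int) : pvShp m n (pvSet2 S i j v) := by
  obtain ⟨h1, h2⟩ := hS
  by_cases hi : i < S.length
  · refine ⟨by simp [pvSet2, h1], ?_⟩
    intro r hr
    rcases List.mem_or_eq_of_mem_set hr with h | h
    · exact h2 r h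
    · subst h
      have hg : S.getD i [] = S[i] := by
        simp [List.getD, List.getElem?_eq_getElem hi]
      rw [List.length_set, hg]
      exact h2 _ (List.getElem_mem hi)
  · have heq : pvSet2 S i j v = S := by
      unfold pvSet2; exact List.set_eq_of_length_le (by omega)
    rw [heq]; exact ⟨h1, h2⟩

theorem pvGet2_set2 {m n : Nat} {S : List (List Int)} (hS : pvShp m n S)
    {i j : Nat} (hi : i < m) (hj : j < n) (v : Int) (i' j' : Nat) :
    pvGet2 (pvSet2 S i j v) i' j' = if i' = i ∧ j' = j then v else pvGet2 S i' j' := by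
  obtain ⟨h1, h2⟩ := hS
  have hiS : i < S.length := by omega
  have hrow : S.getD i [] = S[i] := by simp [List.getD, List.getElem?_eq_getElem hiS]
  have hlen : (S.getD i []).length = n := by rw [hrow]; exact h2 _ (List.getElem_mem hiS)
  by_cases hii : i' = i
  · have houter : (pvSet2 S i j v).getD i' [] = (S.getD i []).set j v := by
      rw [hii]; simp [pvSet2, List.getD, List.getElem?_set_eq_of_lt _ hiS]
    by_cases hjj : j' = j
    · rw [if_pos ⟨hii, hjj⟩, pvGet2, houter, hjj, List.getD_eq_getElem?_getD,
        List.getElem?_set_eq_of_lt _ (show j < (S.getD i []).length by omega)]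
      rfl
    · rw [if_neg (by tauto), pvGet2, houter, pvGet2, hii, List.getD_eq_getElem?_getD,
        List.getElem?_set_ne (show j ≠ j' by omega), ← List.getD_eq_getElem?_getD]
  · rw [if_neg (by tauto)]
    have houter : (pvSet2 S i j v).getD i' [] = S.getD i' [] := by
      rw [pvSet2, List.getD_eq_getElem?_getD,
        List.getElem?_set_ne (show i ≠ i' by omega), ← List.getD_eq_getElem?_getD]
    rw [pvGet2, houter, pvGet2]

theorem pvGet2_rep (m n i j : Nat) :
    pvGet2 (List.replicate m (List.replicate n (0:Int))) i j = 0 := by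
  simp [pvGet2, List.getD, List.getElem?_replicate]
  split_ifs <;> simp

theorem pvShp_rep (m n : Nat) : pvShp m n (List.replicate m (List.replicate n (0:Int))) := by
  constructor
  · simp
  · intro r hr; rcases List.eq_of_mem_replicate hr with rfl; simp

theorem pvRange'_concat1 (t : Nat) : List.range' 1 (t+1) = List.range' 1 t ++ [1+t] := by
  rw [List.range'_concat]; simp

-- phase 2 (first column) invariant
theorem pvInv2 (A : List (List Int)) (m n : Nat) (hm : 0 < m) (hn : 0 < n) :
    ∀ t, t ≤ m - 1 →
      pvShp m n ((List.range' 1 t).foldl (pvColStep A)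
        (pvSet2 (List.replicate m (List.replicate n 0)) 0 0 (pvGet2 A 0 0))) ∧
      ∀ i j, i < m → j < n →
        pvGet2 ((List.range' 1 t).foldl (pvColStep A)
          (pvSet2 (List.replicate m (List.replicate n 0)) 0 0 (pvGet2 A 0 0))) i j
        = if j = 0 ∧ i ≤ t then pvF A i 0 else 0 := by
  intro t
  induction t with
  | zero =>
    intro _
    have shp0 := pvShp_rep m n
    refine ⟨pvShp_set2 shp0 _ _ _, ?_⟩
    intro i j hi hj
    rw [List.range'_zero, List.foldl_nil, pvGet2_set2 shp0 hm hn, pvGet2_rep]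
    by_cases hc : i = 0 ∧ j = 0
    · obtain ⟨rfl, rfl⟩ := hc
      rw [if_pos ⟨rfl, rfl⟩, if_pos ⟨rfl, le_refl 0⟩]
      simp [pvF]
    · rw [if_neg hc, if_neg (by omega)]
  | succ t ih =>
    intro ht
    obtain ⟨shp, hval⟩ := ih (by omega)
    rw [pvRange'_concat1, List.foldl_append, List.foldl_cons, List.foldl_nil]
    have hstep : pvColStep A ((List.range' 1 t).foldl (pvColStep A)
        (pvSet2 (List.replicate m (List.replicate n 0)) 0 0 (pvGet2 A 0 0))) (1+t)
        = pvSet2 ((List.range' 1 t).foldl (pvColStep A)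
        (pvSet2 (List.replicate m (List.replicate n 0)) 0 0 (pvGet2 A 0 0))) (1+t) 0
          (pvF A (1+t) 0) := by
      rw [pvColStep, (show 1 + t - 1 = t by omega), hval t 0 (by omega) hn,
        if_pos ⟨rfl, le_refl t⟩, (show 1 + t = t + 1 by omega)]
      simp [pvF]
    rw [hstep]
    refine ⟨pvShp_set2 shp _ _ _, ?_⟩
    intro i j hi hj
    rw [pvGet2_set2 shp (by omega) hn, hval i j hi hj]
    by_cases hc : i = 1 + t ∧ j = 0
    · obtain ⟨rfl, rfl⟩ := hc
      rw [if_pos ⟨rfl, rfl⟩, if_pos ⟨rfl, by omega⟩]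
    · rw [if_neg hc]
      split_ifs <;> first | rfl | omega

-- phase 3 (first row) invariant
theorem pvInv3 (A : List (List Int)) (m n : Nat) (hm : 0 < m) (hn : 0 < n)
    (S : List (List Int)) (shp : pvShp m n S)
    (hS : ∀ i j, i < m → j < n → pvGet2 S i j = if j = 0 then pvF A i 0 else 0) :
    ∀ t, t ≤ n - 1 →
      pvShp m n ((List.range' 1 t).foldl (pvRowStep A) S) ∧
      ∀ i j, i < m → j < n →
        pvGet2 ((List.range' 1 t).foldl (pvRowStep A) S) i j
        = if j = 0 then pvF A i 0 else if i = 0 ∧ j ≤ t then pvF A 0 j else 0 := by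
  intro t
  induction t with
  | zero =>
    intro _
    refine ⟨by simpa using shp, ?_⟩
    intro i j hi hj
    rw [List.range'_zero, List.foldl_nil, hS i j hi hj]
    split_ifs <;> first | rfl | omega
  | succ t ih =>
    intro ht
    obtain ⟨shp', hval⟩ := ih (by omega)
    rw [pvRange'_concat1, List.foldl_append, List.foldl_cons, List.foldl_nil]
    have hcur : pvGet2 ((List.range' 1 t).foldl (pvRowStep A) S) 0 t = pvF A 0 t := by
      rw [hval 0 t hm (by omega)]
      rcases Nat.eq_zero_or_pos t with rfl | hp
      · rw [if_pos rfl]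
      · rw [if_neg (by omega), if_pos ⟨rfl, le_refl t⟩]
    have hstep : pvRowStep A ((List.range' 1 t).foldl (pvRowStep A) S) (1+t)
        = pvSet2 ((List.range' 1 t).foldl (pvRowStep A) S) 0 (1+t) (pvF A 0 (1+t)) := by
      rw [pvRowStep, (show 1 + t - 1 = t by omega), hcur, (show 1 + t = t + 1 by omega)]
      simp [pvF]
    rw [hstep]
    refine ⟨pvShp_set2 shp' _ _ _, ?_⟩
    intro i j hi hj
    rw [pvGet2_set2 shp' hm (by omega), hval i j hi hj]
    by_cases hc : i = 0 ∧ j = 1 + t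
    · obtain ⟨rfl, rfl⟩ := hc
      rw [if_pos ⟨rfl, rfl⟩, if_neg (by omega), if_pos ⟨rfl, by omega⟩,
        (show 1 + t = t + 1 by omega)]
    · rw [if_neg hc]
      split_ifs <;> first | rfl | omega

-- inner loop of phase 4: fills row u given rows < u are final
theorem pvInner (A : List (List Int)) (m n : Nat) (hn : 0 < n) (u : Nat)
    (hu : 0 < u) (hum : u < m) (S : List (List Int)) (shp : pvShp m n S)
    (hS : ∀ i j, i < m → j < n → pvGet2 S i j = if i < u ∨ j = 0 then pvF A i j else 0) :
    pvShp m n (pvInnerLoop A n S u) ∧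
    ∀ i j, i < m → j < n →
      pvGet2 (pvInnerLoop A n S u) i j = if i ≤ u ∨ j = 0 then pvF A i j else 0 := by
  obtain ⟨u', rfl⟩ : ∃ u', u = u' + 1 := ⟨u - 1, by omega⟩
  have aux : ∀ s, s ≤ n - 1 →
      pvShp m n ((List.range' 1 s).foldl (pvCellStep A (u'+1)) S) ∧
      ∀ i j, i < m → j < n →
        pvGet2 ((List.range' 1 s).foldl (pvCellStep A (u'+1)) S) i j
        = if i < u'+1 ∨ j = 0 ∨ (i = u'+1 ∧ j ≤ s) then pvF A i j else 0 := by
    intro s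
    induction s with
    | zero =>
      intro _
      refine ⟨by simpa using shp, ?_⟩
      intro i j hi hj
      rw [List.range'_zero, List.foldl_nil, hS i j hi hj]
      split_ifs <;> first | rfl | omega
    | succ s ih =>
      intro hs
      obtain ⟨shp', hval⟩ := ih (by omega)
      rw [pvRange'_concat1, List.foldl_append, List.foldl_cons, List.foldl_nil]
      have hup : pvGet2 ((List.range' 1 s).foldl (pvCellStep A (u'+1)) S) u' (1+s)
          = pvF A u' (1+s) := by
        rw [hval u' (1+s) (by omega) (by omega), if_pos (by omega)]
      have hleft : pvGet2 ((List.range' 1 s).foldl (pvCellStep A (u'+1)) S) (u'+1) s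
          = pvF A (u'+1) s := by
        rw [hval (u'+1) s hum (by omega), if_pos (by omega)]
      have hstep : pvCellStep A (u'+1) ((List.range' 1 s).foldl (pvCellStep A (u'+1)) S) (1+s)
          = pvSet2 ((List.range' 1 s).foldl (pvCellStep A (u'+1)) S) (u'+1) (1+s)
            (pvF A (u'+1) (1+s)) := by
        rw [pvCellStep, (show u' + 1 - 1 = u' by omega), (show 1 + s - 1 = s by omega),
          hup, hleft, (show 1 + s = s + 1 by omega)]
        simp [pvF]
      rw [hstep]
      refine ⟨pvShp_set2 shp' _ _ _, ?_⟩
      intro i j hi hj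
      rw [pvGet2_set2 shp' hum (by omega), hval i j hi hj]
      by_cases hc : i = u' + 1 ∧ j = 1 + s
      · obtain ⟨rfl, rfl⟩ := hc
        rw [if_pos ⟨rfl, rfl⟩, if_pos (by omega)]
      · rw [if_neg hc]
        split_ifs <;> first | rfl | omega
  obtain ⟨shp', hval⟩ := aux (n-1) (le_refl _)
  refine ⟨shp', ?_⟩
  intro i j hi hj
  rw [pvInnerLoop] at *
  rw [hval i j hi hj]
  split_ifs <;> first | rfl | omega

-- phase 4 (interior) outer invariant
theorem pvInv4 (A : List (List Int)) (m n : Nat) (hm : 0 < m) (hn : 0 < n)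
    (S : List (List Int)) (shp : pvShp m n S)
    (hS : ∀ i j, i < m → j < n → pvGet2 S i j
      = if j = 0 then pvF A i 0 else if i = 0 ∧ j ≤ n - 1 then pvF A 0 j else 0) :
    ∀ t, t ≤ m - 1 →
      pvShp m n ((List.range' 1 t).foldl (pvInnerLoop A n) S) ∧
      ∀ i j, i < m → j < n →
        pvGet2 ((List.range' 1 t).foldl (pvInnerLoop A n) S) i j
        = if i ≤ t ∨ j = 0 then pvF A i j else 0 := by
  intro t
  induction t with
  | zero =>
    intro _
    refine ⟨by simpa using shp, ?_⟩
    intro i j hi hj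
    rw [List.range'_zero, List.foldl_nil, hS i j hi hj]
    by_cases hj0 : j = 0
    · subst hj0; rw [if_pos rfl, if_pos (Or.inr rfl)]
    · rw [if_neg hj0]
      by_cases hi0 : i = 0
      · subst hi0
        rw [if_pos ⟨rfl, by omega⟩, if_pos (Or.inl (le_refl 0))]
      · rw [if_neg (by tauto), if_neg (by omega)]
  | succ t ih =>
    intro ht
    obtain ⟨shp', hval⟩ := ih (by omega)
    rw [pvRange'_concat1, List.foldl_append, List.foldl_cons, List.foldl_nil]
    have h := pvInner A m n hn (1+t) (by omega) (by omega)
      ((List.range' 1 t).foldl (pvInnerLoop A n) S) shp'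
      (by intro i j hi hj; rw [hval i j hi hj]; split_ifs <;> first | rfl | omega)
    refine ⟨h.1, ?_⟩
    intro i j hi hj
    rw [h.2 i j hi hj]
    split_ifs <;> first | rfl | omega

-- A computes the recurrence at the far corner
theorem pvA_eq (A : List (List Int)) (h1 : A ≠ []) (h2 : A.headD [] ≠ []) :
    solution A = PySem.Int.toStr (pvF A (A.length - 1) ((A.headD []).length - 1)) := by
  have hm : 0 < A.length := List.length_pos_iff.mpr h1
  have hn : 0 < (A.headD []).length := List.length_pos_iff.mpr h2
  obtain ⟨shp2, hv2⟩ := pvInv2 A A.length (A.headD []).length hm hn (A.length - 1) (le_refl _)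
  obtain ⟨shp3, hv3⟩ := pvInv3 A A.length (A.headD []).length hm hn _ shp2
    (by intro i j hi hj; rw [hv2 i j hi hj]; split_ifs <;> first | rfl | omega)
    ((A.headD []).length - 1) (le_refl _)
  obtain ⟨shp4, hv4⟩ := pvInv4 A A.length (A.headD []).length hm hn _ shp3 hv3
    (A.length - 1) (le_refl _)
  show PySem.Int.toStr (pvGet2 ((List.range' 1 (A.length - 1)).foldl
      (pvInnerLoop A (A.headD []).length)
      ((List.range' 1 ((A.headD []).length - 1)).foldl (pvRowStep A)
        ((List.range' 1 (A.length - 1)).foldl (pvColStep A)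
          (pvSet2 (List.replicate A.length (List.replicate (A.headD []).length 0)) 0 0
            (pvGet2 A 0 0)))))
      (A.length - 1) ((A.headD []).length - 1)) = _
  rw [hv4 (A.length - 1) ((A.headD []).length - 1) (by omega) (by omega),
    if_pos (Or.inl (le_refl _))]

-- ===== B side: the memo only ever stores correct values of the recurrence =====
def pvGood (A : List (List Int)) (memo : PySem.Dict (Nat × Nat) Int) : Prop :=
  ∀ p v, memo.get? p = some v → v = pvF A p.1 p.2

theorem pvGood_insert (A : List (List Int)) (memo : PySem.Dict (Nat × Nat) Int)
    (h : pvGood A memo) (i j : Nat) (v : Int) (hv : v = pvF A i j) :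
    pvGood A (memo.insert (i, j) v) := by
  intro p w hw
  rw [PySem.Dict.get?_insert] at hw
  split_ifs at hw with hp
  · subst hp
    exact (Option.some_inj.mp hw).symm.trans hv
  · exact h p w hw

theorem pvBest_correct (A : List (List Int)) (i j : Nat)
    (memo : PySem.Dict (Nat × Nat) Int) (h : pvGood A memo) :
    (pvBest A i j memo).1 = pvF A i j ∧ pvGood A (pvBest A i j memo).2 := by
  induction i, j, memo using pvBest.induct A with
  | case1 i j memo v hget =>
    rw [pvBest.eq_def, hget]
    exact ⟨h (i, j) v hget, h⟩
  | case2 memo hget =>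
    rw [pvBest.eq_def, hget]
    exact ⟨by simp [pvF], pvGood_insert A memo h 0 0 _ (by simp [pvF])⟩
  | case3 memo j' hget ih =>
    obtain ⟨hv, hg⟩ := ih h
    rw [pvBest.eq_def, hget]
    refine ⟨by simp [pvF, hv], ?_⟩
    exact pvGood_insert A _ hg 0 (j'+1) _ (by simp [pvF, hv])
  | case4 memo i' hget ih =>
    obtain ⟨hv, hg⟩ := ih h
    rw [pvBest.eq_def, hget]
    refine ⟨by simp [pvF, hv], ?_⟩
    exact pvGood_insert A _ hg (i'+1) 0 _ (by simp [pvF, hv])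
  | case5 memo i' j' r1 hget ih1 ih2 =>
    rw [show r1 = pvBest A i' (j'+1) memo from rfl] at ih2
    obtain ⟨hv1, hg1⟩ := ih1 h
    obtain ⟨hv2, hg2⟩ := ih2 hg1
    rw [pvBest.eq_def, hget]
    refine ⟨by simp [pvF, hv1, hv2], ?_⟩
    exact pvGood_insert A _ hg2 (i'+1) (j'+1) _ (by simp [pvF, hv1, hv2])

theorem pvB_eq (A : List (List Int)) :
    solution_alt A = PySem.Int.toStr (pvF A (A.length - 1) ((A.headD []).length - 1)) := by
  have hempty : pvGood A PySem.Dict.empty := by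
    intro p v hv
    rw [PySem.Dict.get?_empty] at hv
    exact absurd hv (by simp)
  rw [solution_alt,
    (pvBest_correct A (A.length - 1) ((A.headD []).length - 1) PySem.Dict.empty hempty).1]

-- ===== VERDICT (by name: the statement is the Claim_ definition above) =====
theorem solution_spec : Claim_equal_solution := by
  intro A _ hPre
  obtain ⟨h1, h2, _⟩ := hPre
  unfold Spec_solution
  rw [pvA_eq A h1 h2, pvB_eq A]
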